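-- pv_equiv track=rewrite | github.com/rishi300101/PCOS | app.py | _parse_gemini_lifestyle_response
-- ===== SOURCE A (Python) =====
-- def _parse_gemini_lifestyle_response(text):
--     """
--     Parse Gemini output into structured dicts/lists.
--     Returns (diet_plan, exercise_plan, lifestyle_tips, stress_sleep).
--     All are empty if parsing fails.
--     """
--     diet_plan = {}
--     exercise_plan = {}
--     lifestyle_tips = []
--     stress_sleep = []
--
--     section = None
--     days = {"Monday", "Tuesday", "Wednesday", "Thursday", "Friday", "Saturday", "Sunday"}
--
--     for line in text.split("\n"):
--         line = line.strip()
--         if not line: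
--             continue
--
--         if line.startswith("DIET_PLAN"):
--             section = "diet"
--             continue
--         elif line.startswith("EXERCISE_PLAN"):
--             section = "exercise"
--             continue
--         elif line.startswith("LIFESTYLE_TIPS"):
--             section = "tips"
--             continue
--         elif line.startswith("STRESS_AND_SLEEP"):
--             section = "stress"
--             continue
--
--         if section == "diet" and ":" in line:
--             day, _, value = line.partition(":")
--             day = day.strip()
--             if day in days:
--                 diet_plan[day] = value.strip()
--
--         elif section == "exercise" and ":" in line:
--             day, _, value = line.partition(":")
--             day = day.strip()
--             if day in days:
--                 exercise_plan[day] = value.strip()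
--
--         elif section == "tips" and line.startswith("-"):
--             tip = line.lstrip("- ").strip()
--             if tip:
--                 lifestyle_tips.append(tip)
--
--         elif section == "stress" and line.startswith("-"):
--             item = line.lstrip("- ").strip()
--             if item:
--                 stress_sleep.append(item)
--
--     return diet_plan, exercise_plan, lifestyle_tips, stress_sleep
-- ===== SOURCE B (Python) =====
-- _DAYS = {"Monday", "Tuesday", "Wednesday", "Thursday", "Friday", "Saturday", "Sunday"}
-- _HEADERS = ("DIET_PLAN", "EXERCISE_PLAN", "LIFESTYLE_TIPS", "STRESS_AND_SLEEP")
--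
--
-- def _weekday_plan(lines):
--     plan = {}
--     for line in lines:
--         if ":" not in line:
--             continue
--         day, _, value = line.partition(":")
--         day = day.strip()
--         if day in _DAYS:
--             plan[day] = value.strip()
--     return plan
--
--
-- def _bullet_items(lines):
--     items = []
--     for line in lines:
--         if line.startswith("-"):
--             item = line.lstrip("- ").strip()
--             if item:
--                 items.append(item)
--     return items
--
--
-- def _parse_gemini_lifestyle_response(text):
--     # Phase 1: bucket the stripped non-empty lines by their current section.
--     buckets = ([], [], [], [])
--     current = None
--     for raw in text.split("\n"):
--         line = raw.strip()
--         if not line: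
--             continue
--         hit = next((i for i, h in enumerate(_HEADERS) if line.startswith(h)), None)
--         if hit is not None:
--             current = hit
--         elif current is not None:
--             buckets[current].append(line)
--     # Phase 2: parse each bucket independently.
--     return (_weekday_plan(buckets[0]), _weekday_plan(buckets[1]),
--             _bullet_items(buckets[2]), _bullet_items(buckets[3]))
-- ===== Notes on version B (the rewrite author's own statement) =====
-- stated objective: alternative
-- what changed: A's single stateful pass that parses while it scans is split into two independent phases: first bucket the stripped non-empty lines by their current section (headers found by scanning an enumerated header list), then parse each bucket separately with dedicated helpers (_weekday_plan, _bullet_items).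
import Mathlib
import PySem

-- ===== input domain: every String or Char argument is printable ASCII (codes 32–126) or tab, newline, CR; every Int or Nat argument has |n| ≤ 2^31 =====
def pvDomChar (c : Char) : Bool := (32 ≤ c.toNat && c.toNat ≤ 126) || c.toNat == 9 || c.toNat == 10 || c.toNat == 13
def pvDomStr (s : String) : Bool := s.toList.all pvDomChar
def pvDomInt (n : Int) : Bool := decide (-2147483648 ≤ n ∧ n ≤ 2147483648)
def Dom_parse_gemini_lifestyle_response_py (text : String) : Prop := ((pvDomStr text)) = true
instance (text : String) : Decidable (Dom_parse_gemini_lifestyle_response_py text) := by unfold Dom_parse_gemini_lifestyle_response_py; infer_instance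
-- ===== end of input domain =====

-- B re-decomposes A's single stateful pass into two phases (bucket lines by section, then parse
-- each bucket independently); same cost, objective: alternative decomposition.

-- Shared primitives missing from PySem (exact ports, used by both sides):
-- line.partition(":") restricted to the (first, third) components with the 1-char separator ':' —
-- exact: before the first ':' / after it ('' when ':' is absent, like Python's partition).
def pvPartitionColon (cs : List Char) : List Char × List Char :=
  (cs.takeWhile (fun c => !(c == ':')), (cs.dropWhile (fun c => !(c == ':'))).drop 1)
-- s.lstrip("- ") — exact: drops leading characters that are '-' or ' '.
def pvLstripDashSpace (cs : List Char) : List Char :=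
  cs.dropWhile (fun c => c == '-' || c == ' ')
-- the Python set of weekday names (membership tests only)
def pvDays : List String :=
  ["Monday", "Tuesday", "Wednesday", "Thursday", "Friday", "Saturday", "Sunday"]

-- ===== PORT A =====
-- A's loop body: one line, full state (section, diet, exercise, tips, stress).
def pvStepA (st : Option String × PySem.Dict String String × PySem.Dict String String × List String × List String)
    (raw : List Char) :
    Option String × PySem.Dict String String × PySem.Dict String String × List String × List String :=
  let line := PySem.Chars.strip raw
  if line = [] then st else
  match st with
  | (sec, diet, ex, tips, stress) =>
    if PySem.Chars.startswith line "DIET_PLAN".toList then (some "diet", diet, ex, tips, stress)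
    else if PySem.Chars.startswith line "EXERCISE_PLAN".toList then (some "exercise", diet, ex, tips, stress)
    else if PySem.Chars.startswith line "LIFESTYLE_TIPS".toList then (some "tips", diet, ex, tips, stress)
    else if PySem.Chars.startswith line "STRESS_AND_SLEEP".toList then (some "stress", diet, ex, tips, stress)
    else if sec == some "diet" && PySem.Chars.isIn [':'] line then
      let dv := pvPartitionColon line
      let day := String.ofList (PySem.Chars.strip dv.1)
      if pvDays.contains day then (sec, diet.insert day (String.ofList (PySem.Chars.strip dv.2)), ex, tips, stress)
      else (sec, diet, ex, tips, stress)
    else if sec == some "exercise" && PySem.Chars.isIn [':'] line then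
      let dv := pvPartitionColon line
      let day := String.ofList (PySem.Chars.strip dv.1)
      if pvDays.contains day then (sec, diet, ex.insert day (String.ofList (PySem.Chars.strip dv.2)), tips, stress)
      else (sec, diet, ex, tips, stress)
    else if sec == some "tips" && PySem.Chars.startswith line ['-'] then
      let tip := PySem.Chars.strip (pvLstripDashSpace line)
      if tip ≠ [] then (sec, diet, ex, tips ++ [String.ofList tip], stress)
      else (sec, diet, ex, tips, stress)
    else if sec == some "stress" && PySem.Chars.startswith line ['-'] then
      let item := PySem.Chars.strip (pvLstripDashSpace line)
      if item ≠ [] then (sec, diet, ex, tips, stress ++ [String.ofList item])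
      else (sec, diet, ex, tips, stress)
    else (sec, diet, ex, tips, stress)

def parse_gemini_lifestyle_response_py (text : String) :
    (List (String × String)) × (List (String × String)) × List String × List String :=
  let fin := (PySem.Chars.splitOn text.toList ['\n']).foldl pvStepA
    (none, PySem.Dict.empty, PySem.Dict.empty, [], [])
  (fin.2.1.items, fin.2.2.1.items, fin.2.2.2.1, fin.2.2.2.2)

-- ===== PORT B =====
def pvHeadersB : List (List Char) :=
  ["DIET_PLAN".toList, "EXERCISE_PLAN".toList, "LIFESTYLE_TIPS".toList, "STRESS_AND_SLEEP".toList]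

-- _weekday_plan's loop body
def pvPlanStepB (plan : PySem.Dict String String) (line : List Char) : PySem.Dict String String :=
  if PySem.Chars.isIn [':'] line = false then plan
  else
    let dv := pvPartitionColon line
    let day := String.ofList (PySem.Chars.strip dv.1)
    if pvDays.contains day then plan.insert day (String.ofList (PySem.Chars.strip dv.2)) else plan

def pvWeekdayPlan (lines : List (List Char)) : PySem.Dict String String :=
  lines.foldl pvPlanStepB PySem.Dict.empty

-- _bullet_items' loop body
def pvBulletStepB (items : List String) (line : List Char) : List String :=
  if PySem.Chars.startswith line ['-'] then
    let item := PySem.Chars.strip (pvLstripDashSpace line)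
    if item ≠ [] then items ++ [String.ofList item] else items
  else items

def pvBulletItems (lines : List (List Char)) : List String :=
  lines.foldl pvBulletStepB []

-- phase-1 loop body: (current, bucket0, bucket1, bucket2, bucket3)
def pvBucketStepB
    (st : Option Int × List (List Char) × List (List Char) × List (List Char) × List (List Char))
    (raw : List Char) :
    Option Int × List (List Char) × List (List Char) × List (List Char) × List (List Char) :=
  let line := PySem.Chars.strip raw
  if line = [] then st else
  match st with
  | (cur, b0, b1, b2, b3) =>
    match ((PySem.List.enumerate pvHeadersB).find? (fun ph => PySem.Chars.startswith line ph.2)).map (·.1) with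
    | some i => (some i, b0, b1, b2, b3)
    | none =>
      match cur with
      | none => (cur, b0, b1, b2, b3)
      | some i =>
        if i == 0 then (cur, b0 ++ [line], b1, b2, b3)
        else if i == 1 then (cur, b0, b1 ++ [line], b2, b3)
        else if i == 2 then (cur, b0, b1, b2 ++ [line], b3)
        else (cur, b0, b1, b2, b3 ++ [line])

def parse_gemini_lifestyle_response_py_alt (text : String) :
    (List (String × String)) × (List (String × String)) × List String × List String :=
  let fin := (PySem.Chars.splitOn text.toList ['\n']).foldl pvBucketStepB (none, [], [], [], [])
  ((pvWeekdayPlan fin.2.1).items, (pvWeekdayPlan fin.2.2.1).items,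
    pvBulletItems fin.2.2.2.1, pvBulletItems fin.2.2.2.2)

-- ===== PRECONDITION & SPEC =====
def Spec_parse_gemini_lifestyle_response_py (text : String) (out : (List (String × String)) × (List (String × String)) × List String × List String) : Prop := out = parse_gemini_lifestyle_response_py_alt text
instance (text : String) (out : (List (String × String)) × (List (String × String)) × List String × List String) : Decidable (Spec_parse_gemini_lifestyle_response_py text out) := by unfold Spec_parse_gemini_lifestyle_response_py; infer_instance

-- ===== CLAIM (what is proved, stated in full; the proofs are below) =====
def Claim_equal_parse_gemini_lifestyle_response_py : Prop := ∀ (text : String), Dom_parse_gemini_lifestyle_response_py text → Spec_parse_gemini_lifestyle_response_py text (parse_gemini_lifestyle_response_py text)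

-- ===== LEMMAS AND PROOFS =====

-- phase-1 fold from current `cur` and empty buckets
def pvB1 (ls : List (List Char)) (cur : Option Int) :
    Option Int × List (List Char) × List (List Char) × List (List Char) × List (List Char) :=
  ls.foldl pvBucketStepB (cur, [], [], [], [])

-- the section string A stores for the bucket index B stores
def pvSecName : Option Int → Option String
  | none => none
  | some i => some (if i == 0 then "diet" else if i == 1 then "exercise" else if i == 2 then "tips" else "stress")

-- phase 1 only ever appends to the buckets
theorem pvBucket_shift (ls : List (List Char)) :
    ∀ (cur : Option Int) (b0 b1 b2 b3 : List (List Char)),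
    ls.foldl pvBucketStepB (cur, b0, b1, b2, b3) =
      ((pvB1 ls cur).1, b0 ++ (pvB1 ls cur).2.1, b1 ++ (pvB1 ls cur).2.2.1,
        b2 ++ (pvB1 ls cur).2.2.2.1, b3 ++ (pvB1 ls cur).2.2.2.2) := by
  induction ls with
  | nil => intro cur b0 b1 b2 b3; simp [pvB1]
  | cons raw ls ih =>
    intro cur b0 b1 b2 b3
    simp only [pvB1, List.foldl_cons]
    by_cases hl : PySem.Chars.strip raw = []
    · rw [show pvBucketStepB (cur, b0, b1, b2, b3) raw = (cur, b0, b1, b2, b3) by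
          simp [pvBucketStepB, hl],
        show pvBucketStepB (cur, [], [], [], []) raw = (cur, [], [], [], []) by
          simp [pvBucketStepB, hl]]
      simpa [pvB1] using ih cur b0 b1 b2 b3
    · rcases hf : ((PySem.List.enumerate pvHeadersB).find?
          (fun ph => PySem.Chars.startswith (PySem.Chars.strip raw) ph.2)).map (·.1) with _ | j
      · rcases cur with _ | i
        · rw [show pvBucketStepB (none, b0, b1, b2, b3) raw = (none, b0, b1, b2, b3) by
              simp [pvBucketStepB, hl, hf],
            show pvBucketStepB (none, [], [], [], []) raw = (none, [], [], [], []) by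
              simp [pvBucketStepB, hl, hf]]
          simpa [pvB1] using ih none b0 b1 b2 b3
        · by_cases h0 : i == 0
          · rw [show pvBucketStepB (some i, b0, b1, b2, b3) raw =
                  (some i, b0 ++ [PySem.Chars.strip raw], b1, b2, b3) by
                simp [pvBucketStepB, hl, hf, h0],
              show pvBucketStepB (some i, [], [], [], []) raw =
                  (some i, [PySem.Chars.strip raw], [], [], []) by
                simp [pvBucketStepB, hl, hf, h0]]
            rw [ih (some i) (b0 ++ [PySem.Chars.strip raw]) b1 b2 b3,
                ih (some i) [PySem.Chars.strip raw] [] [] []]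
            simp [pvB1]
          · by_cases h1 : i == 1
            · rw [show pvBucketStepB (some i, b0, b1, b2, b3) raw =
                    (some i, b0, b1 ++ [PySem.Chars.strip raw], b2, b3) by
                  simp [pvBucketStepB, hl, hf, h0, h1],
                show pvBucketStepB (some i, [], [], [], []) raw =
                    (some i, [], [PySem.Chars.strip raw], [], []) by
                  simp [pvBucketStepB, hl, hf, h0, h1]]
              rw [ih (some i) b0 (b1 ++ [PySem.Chars.strip raw]) b2 b3,
                  ih (some i) [] [PySem.Chars.strip raw] [] []]
              simp [pvB1]
            · by_cases h2 : i == 2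
              · rw [show pvBucketStepB (some i, b0, b1, b2, b3) raw =
                      (some i, b0, b1, b2 ++ [PySem.Chars.strip raw], b3) by
                    simp [pvBucketStepB, hl, hf, h0, h1, h2],
                  show pvBucketStepB (some i, [], [], [], []) raw =
                      (some i, [], [], [PySem.Chars.strip raw], []) by
                    simp [pvBucketStepB, hl, hf, h0, h1, h2]]
                rw [ih (some i) b0 b1 (b2 ++ [PySem.Chars.strip raw]) b3,
                    ih (some i) [] [] [PySem.Chars.strip raw] []]
                simp [pvB1]
              · rw [show pvBucketStepB (some i, b0, b1, b2, b3) raw =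
                      (some i, b0, b1, b2, b3 ++ [PySem.Chars.strip raw]) by
                    simp [pvBucketStepB, hl, hf, h0, h1, h2],
                  show pvBucketStepB (some i, [], [], [], []) raw =
                      (some i, [], [], [], [PySem.Chars.strip raw]) by
                    simp [pvBucketStepB, hl, hf, h0, h1, h2]]
                rw [ih (some i) b0 b1 b2 (b3 ++ [PySem.Chars.strip raw]),
                    ih (some i) [] [] [] [PySem.Chars.strip raw]]
                simp [pvB1]
      · rw [show pvBucketStepB (cur, b0, b1, b2, b3) raw = (some j, b0, b1, b2, b3) by
            simp [pvBucketStepB, hl, hf],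
          show pvBucketStepB (cur, [], [], [], []) raw = (some j, [], [], [], []) by
            simp [pvBucketStepB, hl, hf]]
        simpa [pvB1] using ih (some j) b0 b1 b2 b3

theorem pvBulletStep_shift (a : List String) (l : List Char) :
    pvBulletStepB a l = a ++ pvBulletStepB [] l := by
  simp only [pvBulletStepB]; split_ifs <;> simp

-- the bullet-collecting fold only appends
theorem pvBullet_shift (ls : List (List Char)) :
    ∀ (a : List String), ls.foldl pvBulletStepB a = a ++ ls.foldl pvBulletStepB [] := by
  induction ls with
  | nil => intro a; simp
  | cons l ls ih =>
    intro a
    simp only [List.foldl_cons]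
    rw [ih (pvBulletStepB a l), ih (pvBulletStepB [] l)]
    rw [pvBulletStep_shift a l, List.append_assoc]

theorem pvBulletItems_cons (l : List Char) (n : List (List Char)) :
    pvBulletItems (l :: n) = pvBulletStepB [] l ++ pvBulletItems n := by
  simp only [pvBulletItems, List.foldl_cons]
  exact pvBullet_shift n (pvBulletStepB [] l)

-- the coupling invariant: A's pass from the coupled state = B's buckets, parsed
theorem pvMain (ls : List (List Char)) :
    ∀ (cur : Option Int) (d e : PySem.Dict String String) (t s : List String),
    ls.foldl pvStepA (pvSecName cur, d, e, t, s) =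
      (pvSecName (pvB1 ls cur).1,
        (pvB1 ls cur).2.1.foldl pvPlanStepB d,
        (pvB1 ls cur).2.2.1.foldl pvPlanStepB e,
        t ++ pvBulletItems (pvB1 ls cur).2.2.2.1,
        s ++ pvBulletItems (pvB1 ls cur).2.2.2.2) := by
  induction ls with
  | nil => intro cur d e t s; simp [pvB1, pvBulletItems]
  | cons raw ls ih =>
    intro cur d e t s
    have hb1 : pvB1 (raw :: ls) cur = ls.foldl pvBucketStepB (pvBucketStepB (cur, [], [], [], []) raw) := by
      simp [pvB1]
    simp only [List.foldl_cons]
    by_cases hl : PySem.Chars.strip raw = []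
    · rw [show pvStepA (pvSecName cur, d, e, t, s) raw = (pvSecName cur, d, e, t, s) by
        simp [pvStepA, hl]]
      rw [hb1, show pvBucketStepB (cur, [], [], [], []) raw = (cur, [], [], [], []) by
        simp [pvBucketStepB, hl]]
      exact ih cur d e t s
    · set line := PySem.Chars.strip raw with hline
      by_cases g0 : PySem.Chars.startswith line ['D','I','E','T','_','P','L','A','N']
      · rw [show pvStepA (pvSecName cur, d, e, t, s) raw = (pvSecName (some 0), d, e, t, s) by
          simp [pvStepA, ← hline, hl, g0, pvSecName]]
        rw [hb1, show pvBucketStepB (cur, [], [], [], []) raw = (some 0, [], [], [], []) by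
          simp [pvBucketStepB, ← hline, hl, pvHeadersB, PySem.List.enumerate, g0]]
        exact ih (some 0) d e t s
      · by_cases g1 : PySem.Chars.startswith line ['E','X','E','R','C','I','S','E','_','P','L','A','N']
        · rw [show pvStepA (pvSecName cur, d, e, t, s) raw = (pvSecName (some 1), d, e, t, s) by
            simp [pvStepA, ← hline, hl, g0, g1, pvSecName]]
          rw [hb1, show pvBucketStepB (cur, [], [], [], []) raw = (some 1, [], [], [], []) by
            simp [pvBucketStepB, ← hline, hl, pvHeadersB, PySem.List.enumerate, g0, g1]]
          exact ih (some 1) d e t s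
        · by_cases g2 : PySem.Chars.startswith line ['L','I','F','E','S','T','Y','L','E','_','T','I','P','S']
          · rw [show pvStepA (pvSecName cur, d, e, t, s) raw = (pvSecName (some 2), d, e, t, s) by
              simp [pvStepA, ← hline, hl, g0, g1, g2, pvSecName]]
            rw [hb1, show pvBucketStepB (cur, [], [], [], []) raw = (some 2, [], [], [], []) by
              simp [pvBucketStepB, ← hline, hl, pvHeadersB, PySem.List.enumerate, g0, g1, g2]]
            exact ih (some 2) d e t s
          · by_cases g3 : PySem.Chars.startswith line ['S','T','R','E','S','S','_','A','N','D','_','S','L','E','E','P']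
            · rw [show pvStepA (pvSecName cur, d, e, t, s) raw = (pvSecName (some 3), d, e, t, s) by
                simp [pvStepA, ← hline, hl, g0, g1, g2, g3, pvSecName]]
              rw [hb1, show pvBucketStepB (cur, [], [], [], []) raw = (some 3, [], [], [], []) by
                simp [pvBucketStepB, ← hline, hl, pvHeadersB, PySem.List.enumerate, g0, g1, g2, g3]]
              exact ih (some 3) d e t s
            · -- content line
              rcases cur with _ | i
              · simp only [pvSecName]
                rw [show pvStepA (none, d, e, t, s) raw = (none, d, e, t, s) by
                  simp [pvStepA, ← hline, hl, g0, g1, g2, g3]]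
                rw [hb1, show pvBucketStepB (none, [], [], [], []) raw = (none, [], [], [], []) by
                  simp [pvBucketStepB, ← hline, hl, pvHeadersB, PySem.List.enumerate, g0, g1, g2, g3]]
                have ih' := ih none d e t s
                simp only [pvSecName] at ih'
                exact ih'
              · by_cases h0 : i == 0
                · have hsec : pvSecName (some i) = some "diet" := by simp [pvSecName, h0]
                  rw [hsec]
                  rw [show pvStepA (some "diet", d, e, t, s) raw = (some "diet", pvPlanStepB d line, e, t, s) by
                    rcases hc : PySem.Chars.isIn [':'] line with _ | _ <;>
                          simp [pvStepA, ← hline, hl, g0, g1, g2, g3, pvPlanStepB, hc]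
                    split_ifs <;> rfl]
                  rw [hb1, show pvBucketStepB (some i, [], [], [], []) raw = (some i, [line], [], [], []) by
                    simp [pvBucketStepB, ← hline, hl, pvHeadersB, PySem.List.enumerate, g0, g1, g2, g3, h0]]
                  rw [pvBucket_shift]
                  have ih' := ih (some i) (pvPlanStepB d line) e t s
                  rw [hsec] at ih'
                  rw [ih']
                  simp
                · by_cases h1 : i == 1
                  · have hsec : pvSecName (some i) = some "exercise" := by simp [pvSecName, h0, h1]
                    rw [hsec]
                    rw [show pvStepA (some "exercise", d, e, t, s) raw = (some "exercise", d, pvPlanStepB e line, t, s) by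
                      rcases hc : PySem.Chars.isIn [':'] line with _ | _ <;>
                          simp [pvStepA, ← hline, hl, g0, g1, g2, g3, pvPlanStepB, hc]
                      split_ifs <;> rfl]
                    rw [hb1, show pvBucketStepB (some i, [], [], [], []) raw = (some i, [], [line], [], []) by
                      simp [pvBucketStepB, ← hline, hl, pvHeadersB, PySem.List.enumerate, g0, g1, g2, g3, h0, h1]]
                    rw [pvBucket_shift]
                    have ih' := ih (some i) d (pvPlanStepB e line) t s
                    rw [hsec] at ih'
                    rw [ih']
                    simp
                  · by_cases h2 : i == 2
                    · have hsec : pvSecName (some i) = some "tips" := by simp [pvSecName, h0, h1, h2]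
                      rw [hsec]
                      rw [show pvStepA (some "tips", d, e, t, s) raw = (some "tips", d, e, pvBulletStepB t line, s) by
                        rcases hc : PySem.Chars.startswith line ['-'] with _ | _ <;>
                          simp [pvStepA, ← hline, hl, g0, g1, g2, g3, pvBulletStepB, hc]
                        split_ifs <;> rfl]
                      rw [hb1, show pvBucketStepB (some i, [], [], [], []) raw = (some i, [], [], [line], []) by
                        simp [pvBucketStepB, ← hline, hl, pvHeadersB, PySem.List.enumerate, g0, g1, g2, g3, h0, h1, h2]]
                      rw [pvBucket_shift]
                      have ih' := ih (some i) d e (pvBulletStepB t line) s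
                      rw [hsec] at ih'
                      rw [ih']
                      rw [pvBulletStep_shift t line]
                      simp [pvBulletItems_cons, List.append_assoc]
                    · have hsec : pvSecName (some i) = some "stress" := by simp [pvSecName, h0, h1, h2]
                      rw [hsec]
                      rw [show pvStepA (some "stress", d, e, t, s) raw = (some "stress", d, e, t, pvBulletStepB s line) by
                        rcases hc : PySem.Chars.startswith line ['-'] with _ | _ <;>
                          simp [pvStepA, ← hline, hl, g0, g1, g2, g3, pvBulletStepB, hc]
                        split_ifs <;> rfl]
                      rw [hb1, show pvBucketStepB (some i, [], [], [], []) raw = (some i, [], [], [], [line]) by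
                        simp [pvBucketStepB, ← hline, hl, pvHeadersB, PySem.List.enumerate, g0, g1, g2, g3, h0, h1, h2]]
                      rw [pvBucket_shift]
                      have ih' := ih (some i) d e t (pvBulletStepB s line)
                      rw [hsec] at ih'
                      rw [ih']
                      rw [pvBulletStep_shift s line]
                      simp [pvBulletItems_cons, List.append_assoc]

-- ===== VERDICT (by name: the statement is the Claim_ definition above) =====
theorem parse_gemini_lifestyle_response_py_spec : Claim_equal_parse_gemini_lifestyle_response_py := by
  intro text _
  unfold Spec_parse_gemini_lifestyle_response_py
  unfold parse_gemini_lifestyle_response_py parse_gemini_lifestyle_response_py_alt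
  have h := pvMain (PySem.Chars.splitOn text.toList ['\n']) none PySem.Dict.empty PySem.Dict.empty [] []
  simp only [pvSecName] at h
  rw [show (PySem.Chars.splitOn text.toList ['\n']).foldl pvStepA
      (none, PySem.Dict.empty, PySem.Dict.empty, [], []) =
      (PySem.Chars.splitOn text.toList ['\n']).foldl pvStepA
      (pvSecName none, PySem.Dict.empty, PySem.Dict.empty, [], []) from rfl] at *
  rw [h]
  simp [pvB1, pvWeekdayPlan]
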